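-- pv_equiv track=rewrite | github.com/moumouhown/Verification-formelle-ANN | code/python_VNN_LIB_Wrapper.py | adjust_parts
-- ===== SOURCE A (Python) =====
-- def adjust_parts(parts):
--     i = 1
--     while i < len(parts):
--         if len(parts[i].split(" "))> 3:
--             parts[i-1] += parts[i]
--             parts.pop(i)
--         else:
--             i += 1
--     return parts
-- ===== SOURCE B (Python) =====
-- def adjust_parts(parts):
--     res = []
--     buf = []
--     for p in parts:
--         if buf and len(p.split(" ")) > 3:
--             buf.append(p)
--         else:
--             if buf:
--                 res.append("".join(buf))
--             buf = [p]
--     if buf: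
--         res.append("".join(buf))
--     return res
-- ===== Notes on version B (the rewrite author's own statement) =====
-- stated objective: alternative
-- what changed: Replaces the while-loop that pops merged elements out of the list in place (growing the predecessor by repeated string concatenation) with a single forward pass that buffers each run of mergeable parts and joins the run once; B does not mutate its argument (A does), return values agree.
import Mathlib
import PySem

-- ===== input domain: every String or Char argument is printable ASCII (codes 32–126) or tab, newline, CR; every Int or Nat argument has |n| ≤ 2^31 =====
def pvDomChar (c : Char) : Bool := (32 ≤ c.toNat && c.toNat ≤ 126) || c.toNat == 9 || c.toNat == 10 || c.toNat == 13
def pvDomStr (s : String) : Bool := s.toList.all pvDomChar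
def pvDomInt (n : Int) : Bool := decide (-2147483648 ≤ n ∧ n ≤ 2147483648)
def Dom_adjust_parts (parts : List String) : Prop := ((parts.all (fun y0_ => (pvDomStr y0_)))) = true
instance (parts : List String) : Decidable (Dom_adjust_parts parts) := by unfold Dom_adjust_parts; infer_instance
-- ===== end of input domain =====

-- B replaces A's pop-in-place while-loop by one forward pass that buffers each merge run and joins it once;
-- A mutates its argument in place, B does not: the equivalence proved is about the return value.

-- ===== PORT A =====
-- A's while-loop: state (parts, i); on a merge, parts[i-1] += parts[i] and parts.pop(i)
-- (= set (i-1) then eraseIdx i) with i unchanged; otherwise i += 1.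
def adjust_parts_go (parts : List String) (i : Nat) : List String :=
  if h : i < parts.length then
    if ((PySem.Str.split? (parts.getD i "") " ").getD []).length > 3 then
      adjust_parts_go ((parts.set (i-1) ((parts.getD (i-1) "") ++ parts.getD i "")).eraseIdx i) i
    else
      adjust_parts_go parts (i+1)
  else parts
termination_by parts.length - i
decreasing_by
  · simp only [List.length_eraseIdx, List.length_set]
    rw [if_pos h]
    omega
  · omega

def adjust_parts (parts : List String) : List String := adjust_parts_go parts 1

-- ===== PORT B =====
-- Source B: res = []; buf = []; for p in parts: if buf and len(p.split(" ")) > 3: buf.append(p)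
--       else: (if buf: res.append("".join(buf))); buf = [p]
--       finally if buf: res.append("".join(buf))
def adjust_parts_alt (parts : List String) : List String :=
  let st := parts.foldl
    (fun (st : List String × List String) p =>
      if st.2 ≠ [] ∧ ((PySem.Str.split? p " ").getD []).length > 3 then
        (st.1, st.2 ++ [p])
      else
        ((if st.2 ≠ [] then st.1 ++ [PySem.Str.join "" st.2] else st.1), [p]))
    ([], [])
  if st.2 ≠ [] then st.1 ++ [PySem.Str.join "" st.2] else st.1

-- ===== PRECONDITION & SPEC =====
def Spec_adjust_parts (parts : List String) (out : List String) : Prop := out = adjust_parts_alt parts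
instance (parts : List String) (out : List String) : Decidable (Spec_adjust_parts parts out) := by unfold Spec_adjust_parts; infer_instance

-- ===== CLAIM (what is proved, stated in full; the proofs are below) =====
def Claim_equal_adjust_parts : Prop := ∀ (parts : List String), Dom_adjust_parts parts → Spec_adjust_parts parts (adjust_parts parts)

-- ===== LEMMAS AND PROOFS =====

-- clean common specification: merge acc rest folds big parts into acc
def pvMerge (acc : String) : List String → List String
  | [] => [acc]
  | y :: ys =>
      if ((PySem.Str.split? y " ").getD []).length > 3 then pvMerge (acc ++ y) ys
      else acc :: pvMerge y ys

lemma adjust_parts_go_eq (rest : List String) :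
    ∀ (pre : List String) (acc : String),
      adjust_parts_go (pre ++ acc :: rest) (pre.length + 1) = pre ++ pvMerge acc rest := by
  induction rest with
  | nil =>
      intro pre acc
      rw [adjust_parts_go]
      simp [pvMerge]
  | cons y ys ih =>
      intro pre acc
      rw [adjust_parts_go]
      have hlen : pre.length + 1 < (pre ++ acc :: y :: ys).length := by
        simp
      have hy : (pre ++ acc :: y :: ys).getD (pre.length + 1) "" = y := by
        rw [List.getD_eq_getElem _ _ hlen]
        simp
      have hacc : (pre ++ acc :: y :: ys).getD (pre.length + 1 - 1) "" = acc := by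
        have : pre.length + 1 - 1 = pre.length := rfl
        rw [this, List.getD_eq_getElem _ _ (by simp)]
        simp
      rw [dif_pos hlen, hy, hacc]
      by_cases hb : ((PySem.Str.split? y " ").getD []).length > 3
      · rw [if_pos hb]
        have hset : (pre ++ acc :: y :: ys).set (pre.length + 1 - 1) (acc ++ y)
            = pre ++ (acc ++ y) :: y :: ys := by
          have : pre.length + 1 - 1 = pre.length := rfl
          rw [this, List.set_append_right _ _ (le_refl _)]
          simp
        have herase : (pre ++ (acc ++ y) :: y :: ys).eraseIdx (pre.length + 1)
            = pre ++ (acc ++ y) :: ys := by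
          rw [List.eraseIdx_append_of_length_le (by simp)]
          simp
        rw [hset, herase, ih pre (acc ++ y)]
        simp [pvMerge, hb]
      · rw [if_neg hb]
        have hre : pre ++ acc :: y :: ys = (pre ++ [acc]) ++ y :: ys := by simp
        have hi : pre.length + 1 + 1 = (pre ++ [acc]).length + 1 := by simp
        rw [hre, hi, ih (pre ++ [acc]) y]
        simp [pvMerge, hb]

lemma pv_intercalate_nil {α : Type} : ∀ (L : List (List α)), List.intercalate [] L = L.flatten
  | [] => by simp [List.intercalate]
  | [a] => by simp [List.intercalate]
  | a :: b :: t => by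
      have ih := pv_intercalate_nil (b :: t)
      simp [List.intercalate, List.intersperse] at ih ⊢
      simpa using ih

lemma pv_join_eq (l : List String) :
    PySem.Str.join "" l = String.ofList (l.map String.toList).flatten := by
  simp [PySem.Str.join, PySem.Chars.join, pv_intercalate_nil]

lemma pv_join_empty_append (l : List String) (x : String) :
    PySem.Str.join "" (l ++ [x]) = PySem.Str.join "" l ++ x := by
  simp [pv_join_eq]

lemma pv_join_singleton (x : String) : PySem.Str.join "" [x] = x := by
  simp [pv_join_eq]

def pvFlush (st : List String × List String) : List String :=
  if st.2 ≠ [] then st.1 ++ [PySem.Str.join "" st.2] else st.1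

lemma adjust_parts_alt_foldl_eq (rest : List String) :
    ∀ (res buf : List String), buf ≠ [] →
      pvFlush (rest.foldl
        (fun (st : List String × List String) p =>
          if st.2 ≠ [] ∧ ((PySem.Str.split? p " ").getD []).length > 3 then
            (st.1, st.2 ++ [p])
          else
            ((if st.2 ≠ [] then st.1 ++ [PySem.Str.join "" st.2] else st.1), [p]))
        (res, buf)) = res ++ pvMerge (PySem.Str.join "" buf) rest := by
  induction rest with
  | nil =>
      intro res buf hb
      simp [pvFlush, pvMerge, hb]
  | cons y ys ih =>
      intro res buf hb
      by_cases hy : ((PySem.Str.split? y " ").getD []).length > 3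
      · have hstep : (if ((res, buf) : List String × List String).2 ≠ [] ∧ ((PySem.Str.split? y " ").getD []).length > 3 then
            ((res, buf).1, (res, buf).2 ++ [y])
          else
            ((if (res, buf).2 ≠ [] then (res, buf).1 ++ [PySem.Str.join "" (res, buf).2] else (res, buf).1), [y])) = (res, buf ++ [y]) := by
          simp [hb, hy]
        rw [List.foldl_cons, hstep, ih res (buf ++ [y]) (by simp),
            pv_join_empty_append]
        simp [pvMerge, hy]
      · have hstep : (if ((res, buf) : List String × List String).2 ≠ [] ∧ ((PySem.Str.split? y " ").getD []).length > 3 then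
            ((res, buf).1, (res, buf).2 ++ [y])
          else
            ((if (res, buf).2 ≠ [] then (res, buf).1 ++ [PySem.Str.join "" (res, buf).2] else (res, buf).1), [y])) = (res ++ [PySem.Str.join "" buf], [y]) := by
          simp [hb, hy]
        rw [List.foldl_cons, hstep, ih (res ++ [PySem.Str.join "" buf]) [y] (by simp),
            pv_join_singleton]
        simp [pvMerge, hy]

-- ===== VERDICT (by name: the statement is the Claim_ definition above) =====
theorem adjust_parts_spec : Claim_equal_adjust_parts := by
  intro parts _
  unfold Spec_adjust_parts adjust_parts adjust_parts_alt
  cases parts with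
  | nil =>
      rw [adjust_parts_go]
      simp
  | cons x xs =>
      have hA := adjust_parts_go_eq xs [] x
      have hB := adjust_parts_alt_foldl_eq xs [] [x] (by simp)
      rw [pv_join_singleton] at hB
      simp only [List.nil_append] at hA hB
      have hstep : (if ((([] : List String), ([] : List String)) : List String × List String).2 ≠ [] ∧ ((PySem.Str.split? x " ").getD []).length > 3 then
            ((([] : List String), ([] : List String)).1, (([] : List String), ([] : List String)).2 ++ [x])
          else
            ((if (([] : List String), ([] : List String)).2 ≠ [] then (([] : List String), ([] : List String)).1 ++ [PySem.Str.join "" (([] : List String), ([] : List String)).2] else (([] : List String), ([] : List String)).1), [x])) = ([], [x]) := by simp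
      show adjust_parts_go (x :: xs) 1 = pvFlush (List.foldl
        (fun (st : List String × List String) p =>
          if st.2 ≠ [] ∧ ((PySem.Str.split? p " ").getD []).length > 3 then
            (st.1, st.2 ++ [p])
          else
            ((if st.2 ≠ [] then st.1 ++ [PySem.Str.join "" st.2] else st.1), [p]))
        ([], []) (x :: xs))
      rw [List.foldl_cons, hstep]
      exact hA.trans hB.symm
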